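-- pv_equiv track=rewrite | github.com/fenyx-it-academy/14.Hafta-Odevler | Odev3.py | countRank
-- ===== SOURCE A (Python) =====
-- liste = []
--
-- def countRank(scores, i):
--     count = 0
--     rank = 0
--     for j in scores:
--         if j not in liste:
--             liste.append(j)
--             count += 1
--             if j == i:
--                 rank = count
--     liste.clear()
--     return rank
-- ===== SOURCE B (Python) =====
-- def countRank(scores, i):
--     if i not in scores:
--         return 0
--     pos = scores.index(i)
--     return len(set(scores[:pos + 1]))
-- ===== Notes on version B (the rewrite author's own statement) =====
-- stated objective: faster
-- what changed: Replaces A's incremental pass that maintains a seen-list (each 'j not in liste' test scans the list, O(n*d)) and tracks the rank as it goes, by locate-then-measure: find the first index of i, then return the number of distinct values in that prefix via len(set(...)).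
import Mathlib
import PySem

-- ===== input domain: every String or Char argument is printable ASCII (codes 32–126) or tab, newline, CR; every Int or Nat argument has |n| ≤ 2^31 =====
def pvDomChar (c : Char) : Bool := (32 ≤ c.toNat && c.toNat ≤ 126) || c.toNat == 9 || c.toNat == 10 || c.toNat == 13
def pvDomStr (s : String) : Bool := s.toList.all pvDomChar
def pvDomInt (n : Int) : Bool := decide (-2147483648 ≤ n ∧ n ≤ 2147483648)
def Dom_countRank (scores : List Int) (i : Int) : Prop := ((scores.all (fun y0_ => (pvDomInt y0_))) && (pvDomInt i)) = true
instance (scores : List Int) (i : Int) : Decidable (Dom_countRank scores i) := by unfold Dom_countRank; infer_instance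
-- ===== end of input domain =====

-- B replaces A's incremental seen-list pass by locate-then-measure (first index of i, then the distinct count of that prefix via a set); same return value, measured faster.
-- ===== PORT A =====
-- A's loop: state (liste, count, rank); append unseen j, bump count, record rank at j == i.
def countRankLoop (i : Int) : List Int → List Int → Int → Int → Int
  | [], _, _, rank => rank
  | j :: rest, liste, count, rank =>
    if liste.contains j then countRankLoop i rest liste count rank
    else countRankLoop i rest (liste ++ [j]) (count + 1) (if j = i then count + 1 else rank)

def countRank (scores : List Int) (i : Int) : Int :=
  countRankLoop i scores [] 0 0

-- ===== PORT B =====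
-- B: if i not in scores return 0; else pos = scores.index(i); return len(set(scores[:pos+1])).
def countRank_alt (scores : List Int) (i : Int) : Int :=
  if scores.contains i then
    match PySem.List.index? scores i with
    | some pos => ((PySem.Set.ofList (PySem.List.slice scores none (some ((pos : Int) + 1)))).length : Int)
    | none => 0
  else 0

-- ===== PRECONDITION & SPEC =====
def Spec_countRank (scores : List Int) (i : Int) (out : Int) : Prop := out = countRank_alt scores i
instance (scores : List Int) (i : Int) (out : Int) : Decidable (Spec_countRank scores i out) := by unfold Spec_countRank; infer_instance

-- ===== CLAIM (what is proved, stated in full; the proofs are below) =====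
def Claim_equal_countRank : Prop := ∀ (scores : List Int) (i : Int), Dom_countRank scores i → Spec_countRank scores i (countRank scores i)

-- ===== LEMMAS AND PROOFS =====

-- rank is returned unchanged once i is never (again) rankable
theorem countRankLoop_not_mem (i : Int) (l liste : List Int) (count rank : Int)
    (h : i ∉ l) : countRankLoop i l liste count rank = rank := by
  induction l generalizing liste count rank with
  | nil => rfl
  | cons j rest ih =>
    simp only [List.mem_cons, not_or] at h
    simp only [countRankLoop]
    split
    · exact ih liste count rank h.2
    · rw [if_neg (fun hji => h.1 hji.symm)]
      exact ih _ _ _ h.2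

theorem countRankLoop_seen (i : Int) (l liste : List Int) (count rank : Int)
    (h : i ∈ liste) : countRankLoop i l liste count rank = rank := by
  induction l generalizing liste count rank with
  | nil => rfl
  | cons j rest ih =>
    simp only [countRankLoop]
    split
    · exact ih liste count rank h
    · rename_i hc
      rw [if_neg (fun hji => hc (by simp [hji ▸ h]))]
      exact ih (liste ++ [j]) (count + 1) rank (by simp [h])

theorem countRankLoop_main (i : Int) (pre suf : List Int) :
    ∀ (liste : List Int) (rank : Int), i ∉ pre → i ∉ liste →
    countRankLoop i (pre ++ i :: suf) liste (liste.length : Int) rank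
      = ((PySem.Set.update liste (pre ++ [i])).length : Int) := by
  induction pre with
  | nil =>
    intro liste rank _ hl
    simp only [List.nil_append, countRankLoop]
    rw [if_neg (by simpa using hl)]
    simp only [if_true]
    rw [countRankLoop_seen i suf (liste ++ [i]) _ _ (by simp)]
    simp only [PySem.Set.update, List.foldl, PySem.Set.add]
    rw [if_neg (by simpa using hl)]
    simp
  | cons p pre' ih =>
    intro liste rank hpre hl
    simp only [List.mem_cons, not_or] at hpre
    simp only [List.cons_append, countRankLoop]
    split
    · rename_i hc
      have hp : p ∈ liste := by simpa using hc
      rw [ih liste rank hpre.2 hl]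
      have hadd : PySem.Set.add liste p = liste := by simp [PySem.Set.add, hp]
      simp [PySem.Set.update, List.foldl_cons, hadd]
    · rename_i hc
      have hp : p ∉ liste := by simpa using hc
      rw [if_neg (show ¬ p = i from fun hpi => hpre.1 hpi.symm)]
      have hl2 : i ∉ liste ++ [p] := by
        simp [hl, hpre.1]
      have h1 := ih (liste ++ [p]) rank hpre.2 hl2
      rw [show ((liste.length : Int) + 1) = (((liste ++ [p]).length : Nat) : Int) by simp, h1]
      have hadd : PySem.Set.add liste p = liste ++ [p] := by simp [PySem.Set.add, hp]
      simp [PySem.Set.update, List.foldl_cons, hadd]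

theorem take_decomp (pre suf : List Int) (i : Int) :
    (pre ++ i :: suf).take (pre.length + 1) = pre ++ [i] := by
  rw [List.take_append]
  simp

-- ===== VERDICT (by name: the statement is the Claim_ definition above) =====
theorem countRank_spec : Claim_equal_countRank := by
  intro scores i _
  unfold Spec_countRank countRank countRank_alt
  by_cases hmem : i ∈ scores
  · rw [if_pos (by simpa using hmem)]
    obtain ⟨k, hk⟩ := Option.isSome_iff_exists.mp
      ((PySem.List.index?_isSome_iff (xs := scores) (v := i)).mpr hmem)
    rw [hk]
    obtain ⟨pre, suf, hdec, hlen, hnotpre⟩ := (PySem.List.index?_eq_some_iff scores i k).mp hk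
    subst hdec
    have hred : (match some k with
        | some pos => ((PySem.Set.ofList (PySem.List.slice (pre ++ i :: suf) none (some ((pos : Int) + 1)))).length : Int)
        | none => (0 : Int))
        = ((PySem.Set.ofList (PySem.List.slice (pre ++ i :: suf) none (some ((k : Int) + 1)))).length : Int) := rfl
    rw [hred]
    rw [show ((k : Int) + 1) = (((k + 1 : Nat)) : Int) by push_cast; ring,
        PySem.List.slice_to_natCast]
    subst hlen
    rw [take_decomp]
    have h0 : countRankLoop i (pre ++ i :: suf) [] 0 0
        = countRankLoop i (pre ++ i :: suf) [] (([] : List Int).length : Int) 0 := by simp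
    rw [h0, countRankLoop_main i pre suf [] 0 hnotpre (by simp)]
    simp [PySem.Set.update, PySem.Set.ofList_eq_foldl]
  · rw [if_neg (by simpa using hmem)]
    exact countRankLoop_not_mem i scores [] 0 0 hmem
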